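-- pv_equiv track=rewrite | github.com/Adharsh-Chandrasekharan/python | 06-string-remove-oneChar.py | equalization
-- ===== SOURCE A (Python) =====
-- def equalization(n,m,s,t):
--   count=0
--   s1=[]
--   for ch in s:
--     s1.append(ch)
--
--   for i in range(n):
--     char=s1.pop(i)
--     for word in t:
--       if "".join(s1)==word:
--         count+=1
--     s1.insert(i,char)
--   return count
-- ===== SOURCE B (Python) =====
-- def equalization(n, m, s, t):
--     L = len(s)
--     total = 0
--     for word in t:
--         if len(word) != L - 1:
--             continue
--         p = 0
--         while p < len(word) and s[p] == word[p]:
--             p += 1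
--         q = 0
--         while q < len(word) and s[L - 1 - q] == word[len(word) - 1 - q]:
--             q += 1
--         lo = max(0, L - 1 - q)
--         hi = min(p, n - 1)
--         if lo <= hi:
--             total += hi - lo + 1
--     return total
-- ===== Notes on version B (the rewrite author's own statement) =====
-- stated objective: faster
-- what changed: Instead of regenerating, for every deletion position i < n, the string s-without-s[i] and scanning all of t for it, B scans t once and for each word of length len(s)-1 computes the longest common prefix p and suffix q with s, adding the size of the closed-form interval of deletion positions [max(0, len(s)-1-q), min(p, n-1)] that yield that word.
import Mathlib
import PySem

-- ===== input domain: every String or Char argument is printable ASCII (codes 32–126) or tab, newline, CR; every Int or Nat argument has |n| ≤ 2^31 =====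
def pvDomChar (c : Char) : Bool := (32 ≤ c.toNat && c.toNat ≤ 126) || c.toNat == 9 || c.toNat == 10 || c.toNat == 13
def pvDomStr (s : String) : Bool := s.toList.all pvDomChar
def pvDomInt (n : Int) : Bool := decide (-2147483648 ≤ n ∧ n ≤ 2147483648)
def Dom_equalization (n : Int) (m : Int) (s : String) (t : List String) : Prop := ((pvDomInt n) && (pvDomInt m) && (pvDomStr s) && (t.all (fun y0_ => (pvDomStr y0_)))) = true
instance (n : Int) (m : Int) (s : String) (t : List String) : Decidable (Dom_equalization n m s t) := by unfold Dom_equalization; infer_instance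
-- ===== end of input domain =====

-- B replaces A's per-position "delete one char and scan all words" regeneration by a per-word
-- longest-common-prefix/suffix scan and a closed-form count of the matching deletion positions (objective: faster).

-- ===== PORT A =====
def equalization (n : Int) (m : Int) (s : String) (t : List String) : Int :=
  let s1 : List Char := s.toList.foldl (fun acc ch => acc ++ [ch]) []   -- for ch in s: s1.append(ch)
  ((PySem.List.pyRange 0 n 1).foldl
    (fun (st : Int × List Char) i =>
      match PySem.List.pop? st.2 i with
      | none => st                       -- Python raises IndexError here; excluded by Pre_
      | some (ch, rest) =>
        (t.foldl (fun c w => if String.ofList rest = w then c + 1 else c) st.1,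
         PySem.List.insert rest i ch))
    (0, s1)).1

-- ===== PORT B =====
-- the two while-loops of Source B: length of the longest common prefix of two char lists
def pvLcp : List Char → List Char → Nat
  | a :: as, b :: bs => if a = b then pvLcp as bs + 1 else 0
  | _, _ => 0

def equalization_alt (n : Int) (m : Int) (s : String) (t : List String) : Int :=
  let sl := s.toList
  let L : Int := sl.length
  t.foldl (fun total w =>
    let wl := w.toList
    if (wl.length : Int) = L - 1 then
      let p : Int := pvLcp sl wl
      let q : Int := pvLcp sl.reverse wl.reverse
      let lo := max 0 (L - 1 - q)
      let hi := min p (n - 1)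
      if lo ≤ hi then total + (hi - lo + 1) else total
    else total) 0

-- ===== PRECONDITION & SPEC =====
-- Python A pops index i for every i in range(n), so it raises IndexError as soon as n exceeds len(s);
-- Pre_ admits exactly the inputs where every pop is in range (n ≤ len(s); any negative n is fine: range is empty).
def Pre_equalization (n : Int) (m : Int) (s : String) (t : List String) : Prop :=
  n ≤ (s.toList.length : Int)
instance (n : Int) (m : Int) (s : String) (t : List String) : Decidable (Pre_equalization n m s t) := by unfold Pre_equalization; infer_instance

def pvWitness_equalization : Int × Int × String × List String := (2, 0, "aba", ["ba", "aa"])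

def Spec_equalization (n : Int) (m : Int) (s : String) (t : List String) (out : Int) : Prop := out = equalization_alt n m s t
instance (n : Int) (m : Int) (s : String) (t : List String) (out : Int) : Decidable (Spec_equalization n m s t out) := by unfold Spec_equalization; infer_instance

-- ===== CLAIM (what is proved, stated in full; the proofs are below) =====
def Claim_equal_equalization : Prop := ∀ (n : Int) (m : Int) (s : String) (t : List String), Dom_equalization n m s t → Pre_equalization n m s t → Spec_equalization n m s t (equalization n m s t)

-- ===== LEMMAS AND PROOFS =====

theorem pvLcp_le_right : ∀ (a b : List Char), pvLcp a b ≤ b.length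
  | [], _ => by simp [pvLcp]
  | _ :: _, [] => by simp [pvLcp]
  | a :: as, b :: bs => by
    by_cases h : a = b
    · simp only [pvLcp, if_pos h, List.length_cons]
      have := pvLcp_le_right as bs
      omega
    · simp [pvLcp, h]

theorem pv_take_eq_iff : ∀ (k : Nat) (a b : List Char), k ≤ a.length → k ≤ b.length →
    (a.take k = b.take k ↔ k ≤ pvLcp a b)
  | 0, _, _, _, _ => by simp
  | k+1, [], _, ha, _ => by simp at ha
  | k+1, _ :: _, [], _, hb => by simp at hb
  | k+1, a :: as, b :: bs, ha, hb => by
    simp only [List.take_succ_cons, pvLcp, List.cons.injEq]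
    by_cases h : a = b
    · subst h
      rw [if_pos rfl, pv_take_eq_iff k as bs (by simpa using ha) (by simpa using hb)]
      simp only [true_and]
      omega
    · simp only [if_neg h]
      constructor
      · rintro ⟨h1, -⟩; exact absurd h1 h
      · omega

theorem pv_erase_eq_iff (sl wl : List Char) (k : Nat) (hk : k < sl.length)
    (hw : wl.length + 1 = sl.length) :
    sl.eraseIdx k = wl ↔ (k ≤ pvLcp sl wl ∧ sl.length - 1 - pvLcp sl.reverse wl.reverse ≤ k) := by
  have hkw : k ≤ wl.length := by omega
  have key : sl.eraseIdx k = wl ↔ (sl.take k = wl.take k ∧ sl.drop (k+1) = wl.drop k) := by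
    rw [List.eraseIdx_eq_take_drop_succ]
    constructor
    · intro h
      have h' : sl.take k ++ sl.drop (k+1) = wl.take k ++ wl.drop k := by
        rw [h, List.take_append_drop]
      exact List.append_inj h' (by simp; omega)
    · rintro ⟨h2, h3⟩; rw [h2, h3, List.take_append_drop]
  rw [key, pv_take_eq_iff k sl wl hk.le hkw]
  have c2 : sl.drop (k+1) = wl.drop k ↔ sl.length - 1 - pvLcp sl.reverse wl.reverse ≤ k := by
    rw [← List.reverse_inj, List.reverse_drop, List.reverse_drop]
    have e : wl.length - k = sl.length - (k+1) := by omega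
    rw [e, pv_take_eq_iff (sl.length - (k+1)) sl.reverse wl.reverse (by simp) (by simp; omega)]
    omega
  rw [c2]

theorem pv_insert_erase (sl : List Char) (k : Nat) (hk : k < sl.length) :
    PySem.List.insert (sl.eraseIdx k) (k : Int) (sl[k]'hk) = sl := by
  rw [PySem.List.insert_natCast _ k _ (by rw [List.length_eraseIdx_of_lt hk]; omega),
      List.eraseIdx_eq_take_drop_succ,
      List.take_left' (by simp; omega), List.drop_left' (by simp; omega),
      List.getElem_cons_drop hk, List.take_append_drop]

theorem pv_ofList_eq_iff (l : List Char) (w : String) : String.ofList l = w ↔ l = w.toList := by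
  constructor
  · intro h; subst h; simp
  · intro h; subst h; exact String.ofList_toList

theorem pv_A_loop (t : List String) (sl : List Char) (b : Int) (hb : b ≤ (sl.length : Int)) :
    ∀ (N : Nat) (a c : Int), 0 ≤ a → (b - a).toNat = N →
    (PySem.List.pyRange a b 1).foldl
      (fun (st : Int × List Char) i =>
        match PySem.List.pop? st.2 i with
        | none => st
        | some (ch, rest) =>
          (t.foldl (fun c w => if String.ofList rest = w then c + 1 else c) st.1,
           PySem.List.insert rest i ch))
      (c, sl)
    = (c + ((PySem.List.pyRange a b 1).map
        (fun i => (t.countP (fun w => decide (String.ofList (sl.eraseIdx i.toNat) = w)) : Int))).sum, sl) := by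
  intro N
  induction N with
  | zero =>
    intro a c ha hN
    rw [PySem.List.pyRange_one_eq_nil (by omega)]
    simp
  | succ N ih =>
    intro a c ha hN
    have hab : a < b := by omega
    have hlt : a.toNat < sl.length := by omega
    rw [PySem.List.pyRange_one_cons hab]
    simp only [List.foldl_cons, List.map_cons, List.sum_cons]
    have hcast : a = ((a.toNat : Nat) : Int) := by omega
    rw [hcast, PySem.List.pop?_natCast sl a.toNat hlt]
    simp only
    rw [PySem.List.foldl_ite_add_one, pv_insert_erase sl a.toNat hlt,
        ih (a.toNat + 1) _ (by omega) (by omega)]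
    refine Prod.ext ?_ rfl
    simp only [Int.toNat_natCast]
    rw [add_assoc]
    rfl

theorem pv_count_interval (lo hi : Int) (hlo : 0 ≤ lo) : ∀ (N : Nat),
    ((PySem.List.pyRange 0 (N : Int) 1).map (fun i => if lo ≤ i ∧ i ≤ hi then (1 : Int) else 0)).sum
      = max 0 (min hi ((N : Int) - 1) - lo + 1) := by
  intro N
  induction N with
  | zero =>
    rw [PySem.List.pyRange_one_eq_nil (by omega)]
    simp only [List.map_nil, List.sum_nil]
    omega
  | succ N ih =>
    have : ((N + 1 : Nat) : Int) = (N : Int) + 1 := by push_cast; ring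
    rw [this, PySem.List.pyRange_one_succ_right (by omega), List.map_append, List.sum_append, ih]
    simp only [List.map_cons, List.map_nil, List.sum_cons, List.sum_nil]
    split_ifs <;> omega

theorem pv_sum_comm (r : List Int) (g : Int → String → Int) :
    ∀ (t : List String),
    (r.map (fun i => (t.map (fun w => g i w)).sum)).sum
      = (t.map (fun w => (r.map (fun i => g i w)).sum)).sum := by
  intro t
  induction t with
  | nil => simp
  | cons w ws ih =>
    simp only [List.map_cons, List.sum_cons]
    rw [← ih, ← PySem.List.sum_map_add_int]

theorem pv_per_word (sl : List Char) (w : String) (n : Int) (hn : n ≤ (sl.length : Int)) :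
    ((PySem.List.pyRange 0 n 1).map
        (fun i => if String.ofList (sl.eraseIdx i.toNat) = w then (1 : Int) else 0)).sum
    = (if ((w.toList.length : Int) = (sl.length : Int) - 1) then
         (if max 0 ((sl.length : Int) - 1 - (pvLcp sl.reverse w.toList.reverse : Int))
              ≤ min ((pvLcp sl w.toList : Int)) (n - 1)
          then min ((pvLcp sl w.toList : Int)) (n - 1)
                 - max 0 ((sl.length : Int) - 1 - (pvLcp sl.reverse w.toList.reverse : Int)) + 1
          else 0)
       else 0) := by
  rcases le_or_gt n 0 with hn0 | hn0
  · rw [PySem.List.pyRange_one_eq_nil (by omega)]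
    simp only [List.map_nil, List.sum_nil]
    have hq : (pvLcp sl w.toList : Int) ≥ 0 := by positivity
    split_ifs <;> omega
  -- n > 0
  have hq : pvLcp sl.reverse w.toList.reverse ≤ w.toList.length := by
    have := pvLcp_le_right sl.reverse w.toList.reverse
    simpa using this
  by_cases hlen : ((w.toList.length : Int) = (sl.length : Int) - 1)
  · rw [if_pos hlen]
    have hcong : ∀ i ∈ PySem.List.pyRange 0 n 1,
        (if String.ofList (sl.eraseIdx i.toNat) = w then (1 : Int) else 0)
          = (if max 0 ((sl.length : Int) - 1 - (pvLcp sl.reverse w.toList.reverse : Int)) ≤ i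
                ∧ i ≤ ((pvLcp sl w.toList : Int)) then (1 : Int) else 0) := by
      intro i hi
      rw [PySem.List.mem_pyRange_one] at hi
      have hk : i.toNat < sl.length := by omega
      have hiff := pv_erase_eq_iff sl w.toList i.toNat hk (by omega)
      refine if_congr ?_ rfl rfl
      rw [pv_ofList_eq_iff, hiff]
      omega
    rw [List.map_congr_left hcong]
    have hcast : n = ((n.toNat : Nat) : Int) := by omega
    rw [hcast, pv_count_interval _ _ (by positivity)]
    have : ((n.toNat : Nat) : Int) = n := by omega
    rw [this]
    split_ifs <;> omega
  · rw [if_neg hlen]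
    have hcong : ∀ i ∈ PySem.List.pyRange 0 n 1,
        (if String.ofList (sl.eraseIdx i.toNat) = w then (1 : Int) else 0) = (0 : Int) := by
      intro i hi
      rw [PySem.List.mem_pyRange_one] at hi
      have hk : i.toNat < sl.length := by omega
      rw [if_neg]
      rw [pv_ofList_eq_iff]
      intro h
      have : (sl.eraseIdx i.toNat).length = sl.length - 1 := List.length_eraseIdx_of_lt hk
      rw [h] at this
      omega
    rw [List.map_congr_left hcong]
    simp

theorem pv_foldl_add (f : String → Int) : ∀ (t : List String) (c : Int),
    t.foldl (fun acc w => acc + f w) c = c + (t.map f).sum := by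
  intro t
  induction t with
  | nil => simp
  | cons w ws ih => intro c; simp only [List.foldl_cons, List.map_cons, List.sum_cons, ih]; ring


-- ===== VERDICT (by name: the statement is the Claim_ definition above) =====
theorem equalization_spec : Claim_equal_equalization := by
  intro n m s t _ hpre
  unfold Pre_equalization at hpre
  unfold Spec_equalization
  unfold equalization equalization_alt
  simp only [PySem.List.foldl_append_singleton, List.nil_append]
  rw [pv_A_loop t s.toList n hpre ((n - 0).toNat) 0 0 le_rfl rfl]
  simp only [zero_add]
  have h1 : ∀ i ∈ PySem.List.pyRange 0 n 1,
      ((t.countP (fun w => decide (String.ofList (s.toList.eraseIdx i.toNat) = w)) : Int))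
        = (t.map (fun w => if String.ofList (s.toList.eraseIdx i.toNat) = w then (1 : Int) else 0)).sum := by
    intro i _
    exact (PySem.List.sum_map_ite_one_zero' _ t).symm
  rw [List.map_congr_left h1, pv_sum_comm]
  have h2 : ∀ w ∈ t,
      ((PySem.List.pyRange 0 n 1).map
          (fun i => if String.ofList (s.toList.eraseIdx i.toNat) = w then (1 : Int) else 0)).sum
        = (if ((w.toList.length : Int) = (s.toList.length : Int) - 1) then
             (if max 0 ((s.toList.length : Int) - 1 - (pvLcp s.toList.reverse w.toList.reverse : Int))
                  ≤ min ((pvLcp s.toList w.toList : Int)) (n - 1)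
              then min ((pvLcp s.toList w.toList : Int)) (n - 1)
                     - max 0 ((s.toList.length : Int) - 1
                         - (pvLcp s.toList.reverse w.toList.reverse : Int)) + 1
              else 0)
           else 0) := fun w _ => pv_per_word s.toList w n hpre
  rw [List.map_congr_left h2]
  have h3 : (fun (total : Int) (w : String) =>
      if ((w.toList.length : Int) = (s.toList.length : Int) - 1) then
        (if max 0 ((s.toList.length : Int) - 1 - (pvLcp s.toList.reverse w.toList.reverse : Int))
             ≤ min ((pvLcp s.toList w.toList : Int)) (n - 1)
         then total + (min ((pvLcp s.toList w.toList : Int)) (n - 1)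
                - max 0 ((s.toList.length : Int) - 1
                    - (pvLcp s.toList.reverse w.toList.reverse : Int)) + 1)
         else total)
      else total)
      = (fun (total : Int) (w : String) => total +
          (if ((w.toList.length : Int) = (s.toList.length : Int) - 1) then
             (if max 0 ((s.toList.length : Int) - 1 - (pvLcp s.toList.reverse w.toList.reverse : Int))
                  ≤ min ((pvLcp s.toList w.toList : Int)) (n - 1)
              then min ((pvLcp s.toList w.toList : Int)) (n - 1)
                     - max 0 ((s.toList.length : Int) - 1
                         - (pvLcp s.toList.reverse w.toList.reverse : Int)) + 1
              else 0)
           else 0)) := by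
    funext total w
    split_ifs <;> ring
  rw [h3, pv_foldl_add, zero_add]
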